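-- pv_equiv track=rewrite | github.com/alainrk/aoc | 2025/10/main.py | search
-- ===== SOURCE A (Python) =====
-- from collections import deque
--
-- def search(target, numbers):
--     if target == 0:
--         return 0, []
--
--     visited = set()
--     q = deque([(0, [])])  # curr value, path
--
--     while q:
--         curr, path = q.popleft()
--         for n in numbers:
--             nv = curr ^ n
--             if nv == target:
--                 return len(path) + 1, path + [n]
--             if nv not in visited:
--                 visited.add(nv)
--                 q.append((nv, path + [n]))
--     return -1, []
-- ===== SOURCE B (Python) =====
-- def search(target, numbers):
--     if target == 0:
--         return 0, []
--
--     # Phase 1: pathless BFS.  'order' holds every discovered value in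
--     # discovery order and doubles as the queue (index i is the read head);
--     # only the hitting edge (curr, n) is remembered, no per-node paths.
--     order = [0]
--     visited = set()
--     i = 0
--     hit = None
--     while i < len(order):
--         curr = order[i]
--         for n in numbers:
--             nv = curr ^ n
--             if nv == target:
--                 hit = (curr, n)
--                 break
--             if nv not in visited:
--                 visited.add(nv)
--                 order.append(nv)
--         if hit is not None:
--             break
--         i += 1
--     if hit is None:
--         return -1, []
--
--     # Phase 2: reconstruct the path backwards.  The first-discovery parent
--     # of a value v is the earliest u in discovery order with u ^ m == v for
--     # some m (with m the earliest such number), so no parent pointers are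
--     # needed: rescan 'order' for each step back to the root 0.
--     curr, n = hit
--     moves = [n]
--     while curr != 0:
--         um = None
--         for u in order:
--             for m in numbers:
--                 if u ^ m == curr:
--                     um = (u, m)
--                     break
--             if um is not None:
--                 break
--         curr, m = um
--         moves.append(m)
--     moves.reverse()
--     return len(moves), moves
-- ===== Notes on version B (the rewrite author's own statement) =====
-- stated objective: alternative
-- what changed: B stores no per-node paths at all: phase 1 is a pathless search recording only the discovery order of values (one growing list doubling as the queue) and the hitting edge, and phase 2 reconstructs the answer path backwards by rescanning the discovery order for each value's first possible predecessor, using that in first-discovery BFS the parent of v is the earliest listed u with u ^ m == v.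
import Mathlib
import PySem

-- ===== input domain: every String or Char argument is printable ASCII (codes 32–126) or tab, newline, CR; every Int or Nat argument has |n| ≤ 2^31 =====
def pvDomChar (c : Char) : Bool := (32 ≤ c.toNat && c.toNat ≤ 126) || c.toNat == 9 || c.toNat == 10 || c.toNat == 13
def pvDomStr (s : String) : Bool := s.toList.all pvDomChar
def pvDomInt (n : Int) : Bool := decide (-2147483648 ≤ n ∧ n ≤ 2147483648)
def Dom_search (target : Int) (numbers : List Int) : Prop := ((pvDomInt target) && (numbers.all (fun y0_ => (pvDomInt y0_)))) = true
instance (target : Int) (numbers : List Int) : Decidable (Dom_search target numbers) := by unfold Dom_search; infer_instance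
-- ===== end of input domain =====

-- B stores no per-node paths: a pathless BFS records only the discovery order of values and the
-- hitting edge, and the path is rebuilt afterwards by rescanning that order for first predecessors
-- (objective: alternative).  Both 'while' loops are ported with a fuel counter solely to make them
-- total in Lean; the fuel bounds exceed the possible number of iterations.

-- ===== PORT A =====
-- inner 'for n in numbers' loop of A: returns early result or (visited, queue) after appends
def searchStepA (target curr : Int) (path : List Int) :
    List Int → PySem.Set Int → List (Int × List Int) →
    (Int × List Int) ⊕ (PySem.Set Int × List (Int × List Int))
  | [], visited, q => .inr (visited, q)
  | n :: ns, visited, q =>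
    let nv := PySem.Int.bxor curr n
    if nv = target then .inl (((path.length : Int) + 1), path ++ [n])
    else if PySem.Set.contains visited nv then searchStepA target curr path ns visited q
    else searchStepA target curr path ns (PySem.Set.add visited nv) (q ++ [(nv, path ++ [n])])

-- the 'while q' loop of A (fuel decreases once per popleft)
def searchGoA (target : Int) (numbers : List Int) :
    Nat → List (Int × List Int) → PySem.Set Int → Int × List Int
  | 0, _, _ => (-1, [])
  | _ + 1, [], _ => (-1, [])
  | fuel + 1, (curr, path) :: q, visited =>
    match searchStepA target curr path numbers visited q with
    | .inl r => r
    | .inr (visited', q') => searchGoA target numbers fuel q' visited'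

def search (target : Int) (numbers : List Int) : Int × List Int :=
  if target = 0 then (0, [])
  else searchGoA target numbers (2 ^ numbers.length + 1) [(0, [])] PySem.Set.empty

-- ===== PORT B =====
-- B phase 1, inner 'for n in numbers' loop: hit edge (some n) or appends to order/visited
def p1Inner (target curr : Int) :
    List Int → List Int → PySem.Set Int → Option Int × List Int × PySem.Set Int
  | [], order, visited => (none, order, visited)
  | n :: ns, order, visited =>
    let nv := PySem.Int.bxor curr n
    if nv = target then (some n, order, visited)
    else if PySem.Set.contains visited nv then p1Inner target curr ns order visited
    else p1Inner target curr ns (order ++ [nv]) (PySem.Set.add visited nv)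

-- B phase 1, the 'while i < len(order)' loop (fuel decreases once per iteration)
def p1Go (target : Int) (numbers : List Int) :
    Nat → Nat → List Int → PySem.Set Int → Option (Int × Int) × List Int
  | 0, _, order, _ => (none, order)
  | fuel + 1, i, order, visited =>
    match order[i]? with
    | none => (none, order)
    | some curr =>
      match p1Inner target curr numbers order visited with
      | (some n, order', _) => (some (curr, n), order')
      | (none, order', visited') => p1Go target numbers fuel (i + 1) order' visited'

-- B phase 2, inner 'for m in numbers' scan
def firstN (v u : Int) : List Int → Option Int
  | [] => none
  | m :: ms => if PySem.Int.bxor u m = v then some m else firstN v u ms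

-- B phase 2, 'for u in order' scan: first (u, m) in order × numbers with u ^ m == v
def parentOf (numbers : List Int) (v : Int) : List Int → Option (Int × Int)
  | [] => none
  | u :: us =>
    match firstN v u numbers with
    | some m => some (u, m)
    | none => parentOf numbers v us

-- B phase 2, the 'while curr != 0' loop (fuel makes it total; none is unreachable)
def walkB (numbers order : List Int) : Nat → Int → List Int → Option (List Int)
  | 0, _, _ => none
  | fuel + 1, curr, moves =>
    if curr = 0 then some moves
    else
      match parentOf numbers curr order with
      | none => none
      | some (u, m) => walkB numbers order fuel u (moves ++ [m])

def search_alt (target : Int) (numbers : List Int) : Int × List Int :=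
  if target = 0 then (0, [])
  else
    match p1Go target numbers (2 ^ numbers.length + 1) 0 [0] PySem.Set.empty with
    | (none, _) => (-1, [])
    | (some (curr, n), order) =>
      match walkB numbers order (order.length + 1) curr [n] with
      | none => (-1, [])
      | some moves => ((moves.reverse.length : Int), moves.reverse)

-- ===== PRECONDITION & SPEC =====
def Spec_search (target : Int) (numbers : List Int) (out : Int × List Int) : Prop := out = search_alt target numbers
instance (target : Int) (numbers : List Int) (out : Int × List Int) : Decidable (Spec_search target numbers out) := by unfold Spec_search; infer_instance

-- ===== CLAIM (what is proved, stated in full; the proofs are below) =====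
def Claim_equal_search : Prop := ∀ (target : Int) (numbers : List Int), Dom_search target numbers → Spec_search target numbers (search target numbers)

-- ===== LEMMAS AND PROOFS =====

-- the reversed answer path ms leads backwards from v to 0 along first-predecessor scans,
-- with strictly decreasing positions in 'order'
def GoodRev (numbers order : List Int) : Int → List Int → Prop
  | v, [] => v = 0
  | v, m :: rest => v ∈ order ∧ ∃ u, parentOf numbers v order = some (u, m) ∧
      order.idxOf u < order.idxOf v ∧ GoodRev numbers order u rest

theorem parentOf_append (numbers : List Int) (v : Int) (order ext : List Int) (r : Int × Int)
    (h : parentOf numbers v order = some r) : parentOf numbers v (order ++ ext) = some r := by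
  induction order with
  | nil => simp [parentOf] at h
  | cons u us ih =>
    simp only [parentOf, List.cons_append] at h ⊢
    cases hf : firstN v u numbers with
    | some m => simpa [hf] using (by simpa [hf] using h)
    | none => exact ih (by simpa [hf] using h)

theorem idxOf_append_of_mem {v : Int} {order : List Int} (ext : List Int) (h : v ∈ order) :
    (order ++ ext).idxOf v = order.idxOf v := by
  induction order with
  | nil => simp at h
  | cons u us ih =>
    by_cases huv : u = v
    · simp [huv]
    · rcases List.mem_cons.mp h with h1 | h1
      · exact absurd h1.symm huv
      · simp [List.idxOf_cons_ne _ huv, ih h1]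

theorem parentOf_mem (numbers : List Int) (v : Int) :
    ∀ (order : List Int) (u m : Int), parentOf numbers v order = some (u, m) → u ∈ order := by
  intro order
  induction order with
  | nil => intro u m h; simp [parentOf] at h
  | cons w ws ih =>
    intro u m h
    simp only [parentOf] at h
    cases hf : firstN v w numbers with
    | some m' => simp [hf] at h; simp [h.1]
    | none => exact List.mem_cons_of_mem _ (ih u m (by simpa [hf] using h))

theorem goodRev_append (numbers order ext : List Int) :
    ∀ (v : Int) (ms : List Int), GoodRev numbers order v ms → GoodRev numbers (order ++ ext) v ms := by
  intro v ms
  induction ms generalizing v with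
  | nil => intro h; exact h
  | cons m rest ih =>
    rintro ⟨hv, u, hp, hlt, hg⟩
    refine ⟨List.mem_append_left _ hv, u, parentOf_append _ _ _ _ _ hp, ?_, ih u hg⟩
    have hu : u ∈ order := parentOf_mem numbers v order u m hp
    rw [idxOf_append_of_mem ext hu, idxOf_append_of_mem ext hv]; exact hlt

-- walk succeeds on a GoodRev chain, with any fuel exceeding v's position
theorem walkB_of_goodRev (numbers order : List Int) (h0 : order.idxOf (0 : Int) = 0) :
    ∀ (ms : List Int) (v : Int), GoodRev numbers order v ms →
      ∀ (acc : List Int) (fuel : Nat), order.idxOf v < fuel →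
        walkB numbers order fuel v acc = some (acc ++ ms) := by
  intro ms
  induction ms with
  | nil =>
    intro v hv acc fuel hf
    have hv0 : v = 0 := hv
    cases fuel with
    | zero => omega
    | succ k => simp [walkB, hv0]
  | cons m rest ih =>
    rintro v ⟨hvmem, u, hp, hlt, hg⟩ acc fuel hf
    have hvne : v ≠ 0 := by
      intro h; rw [h, h0] at hlt; omega
    cases fuel with
    | zero => omega
    | succ k =>
      simp only [walkB, hvne, if_false, hp]
      rw [ih u hg (acc ++ [m]) k (by omega)]
      simp

-- ===== main simulation =====

-- all children of u are non-target and already visited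
def Closed (target : Int) (numbers : List Int) (visited : PySem.Set Int) (u : Int) : Prop :=
  ∀ m ∈ numbers, PySem.Int.bxor u m ≠ target ∧ PySem.Int.bxor u m ∈ visited

-- per-entry invariant of the simulation: either the path is reconstructible, or the
-- entry's value was expanded before and all its children are settled
def EntryInv (target : Int) (numbers order : List Int) (visited : PySem.Set Int)
    (e : Int × List Int) : Prop :=
  GoodRev numbers order e.1 e.2.reverse ∨ Closed target numbers visited e.1

theorem mem_add_self (s : PySem.Set Int) (x : Int) : x ∈ PySem.Set.add s x := by
  by_cases h : x ∈ s
  · simpa [PySem.Set.add_of_mem h]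
  · simp [PySem.Set.add_of_not_mem h]

theorem mem_add_mono (s : PySem.Set Int) (x y : Int) (h : y ∈ s) : y ∈ PySem.Set.add s x := by
  by_cases hx : x ∈ s
  · simpa [PySem.Set.add_of_mem hx]
  · simp [PySem.Set.add_of_not_mem hx, h]

theorem closed_mono {target : Int} {numbers : List Int} {v v' : PySem.Set Int} {u : Int}
    (hm : ∀ x ∈ v, x ∈ v') (h : Closed target numbers v u) : Closed target numbers v' u := by
  intro m hmm; exact ⟨(h m hmm).1, hm _ (h m hmm).2⟩

theorem entryInv_mono {target : Int} {numbers order : List Int} {ext : List Int}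
    {v v' : PySem.Set Int} {e : Int × List Int}
    (hm : ∀ x ∈ v, x ∈ v') (h : EntryInv target numbers order v e) :
    EntryInv target numbers (order ++ ext) v' e := by
  rcases h with h | h
  · exact .inl (goodRev_append _ _ _ _ _ h)
  · exact .inr (closed_mono hm h)

theorem idxOf_le_of_getElem? {l : List Int} {i : Nat} {x : Int} (h : l[i]? = some x) :
    l.idxOf x ≤ i := by
  induction l generalizing i with
  | nil => simp at h
  | cons a as ih =>
    cases i with
    | zero => simp_all
    | succ j =>
      by_cases hax : a = x
      · simp [hax]
      · simp only [List.getElem?_cons_succ] at h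
        simp [List.idxOf_cons_ne _ hax]
        exact ih h

theorem idxOf_append_fresh {l : List Int} {x : Int} (h : x ∉ l) :
    (l ++ [x]).idxOf x = l.length := by
  induction l with
  | nil => simp
  | cons a as ih =>
    have hax : a ≠ x := fun he => h (he ▸ List.mem_cons_self)
    simp [List.idxOf_cons_ne _ hax, ih (fun hm => h (List.mem_cons_of_mem _ hm))]

theorem firstN_none {v u : Int} {ms : List Int} (h : ∀ m ∈ ms, PySem.Int.bxor u m ≠ v) :
    firstN v u ms = none := by
  induction ms with
  | nil => rfl
  | cons m ms ih =>
    simp [firstN, h m (by simp)]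
    exact ih fun m' hm' => h m' (List.mem_cons_of_mem _ hm')

theorem firstN_found {v u n : Int} {pre post : List Int}
    (hpre : ∀ m ∈ pre, PySem.Int.bxor u m ≠ v) (hn : PySem.Int.bxor u n = v) :
    firstN v u (pre ++ n :: post) = some n := by
  induction pre with
  | nil => simp [firstN, hn]
  | cons m ms ih =>
    simp [firstN, hpre m (by simp)]
    exact ih fun m' hm' => hpre m' (List.mem_cons_of_mem _ hm')

theorem parentOf_found {numbers : List Int} {v curr n : Int} {A B : List Int}
    (hA : ∀ u ∈ A, firstN v u numbers = none) (hc : firstN v curr numbers = some n) :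
    parentOf numbers v (A ++ curr :: B) = some (curr, n) := by
  induction A with
  | nil => simp [parentOf, hc]
  | cons a as ih =>
    simp [parentOf, hA a (by simp)]
    exact ih fun u hu => hA u (List.mem_cons_of_mem _ hu)

-- the inner loop when every child of curr is already settled: nothing happens
theorem inner_closed (target curr : Int) (p : List Int) :
    ∀ (ns order : List Int) (visited : PySem.Set Int) (q : List (Int × List Int)),
      (∀ m ∈ ns, PySem.Int.bxor curr m ≠ target ∧ PySem.Int.bxor curr m ∈ visited) →
      p1Inner target curr ns order visited = (none, order, visited) ∧
        searchStepA target curr p ns visited q = .inr (visited, q) := by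
  intro ns
  induction ns with
  | nil => intro order visited q _; exact ⟨rfl, rfl⟩
  | cons n ns ih =>
    intro order visited q h
    have hn := h n (by simp)
    have hc : PySem.Set.contains visited (PySem.Int.bxor curr n) = true :=
      (PySem.Set.contains_iff _ _).mpr hn.2
    simp only [p1Inner, searchStepA, hn.1, if_false, hc, if_true]
    exact ih order visited q fun m hm => h m (List.mem_cons_of_mem _ hm)

-- the inner loop in general (curr's path is reconstructible)
theorem inner_good (target curr : Int) (numbers : List Int) (p : List Int) :
    ∀ (ns pre order : List Int) (visited : PySem.Set Int) (q : List (Int × List Int)) (i : Nat),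
      pre ++ ns = numbers →
      order[i]? = some curr →
      (∀ m ∈ pre, PySem.Int.bxor curr m ≠ target ∧ PySem.Int.bxor curr m ∈ visited) →
      (∀ u ∈ order.take i, Closed target numbers visited u) →
      (∃ rest, order = 0 :: rest ∧ ∀ x ∈ rest, x ∈ visited) →
      GoodRev numbers order curr p.reverse →
      (match p1Inner target curr ns order visited with
       | (some n, order', _) =>
           searchStepA target curr p ns visited q = .inl ((p.length : Int) + 1, p ++ [n])
           ∧ ∃ ext, order' = order ++ ext
       | (none, order', visited') =>
           ∃ news : List (Int × List Int),
             searchStepA target curr p ns visited q = .inr (visited', q ++ news)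
             ∧ order' = order ++ news.map Prod.fst
             ∧ (∀ x ∈ visited, x ∈ visited')
             ∧ (∀ e ∈ news, e.1 ∈ visited')
             ∧ (∀ m ∈ ns, PySem.Int.bxor curr m ≠ target ∧ PySem.Int.bxor curr m ∈ visited')
             ∧ (∀ e ∈ news, EntryInv target numbers order' visited' e ∨ e.1 = curr)) := by
  intro ns
  induction ns with
  | nil =>
    intro pre order visited q i _ _ _ _ _ _
    simp only [p1Inner, searchStepA]
    exact ⟨[], by simp, by simp, fun x h => h, by simp, by simp, by simp⟩
  | cons n ns ih =>
    intro pre order visited q i hnum hcur hpre hclosed hhead hG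
    by_cases ht : PySem.Int.bxor curr n = target
    · simp only [p1Inner, searchStepA, ht, if_true]
      exact ⟨trivial, [], by simp⟩
    · by_cases hv : PySem.Int.bxor curr n ∈ visited
      · have hc : PySem.Set.contains visited (PySem.Int.bxor curr n) = true :=
          (PySem.Set.contains_iff _ _).mpr hv
        simp only [p1Inner, searchStepA, ht, if_false, hc, if_true]
        have hpre' : ∀ m ∈ pre ++ [n],
            PySem.Int.bxor curr m ≠ target ∧ PySem.Int.bxor curr m ∈ visited := by
          intro m hm
          rcases List.mem_append.mp hm with hm | hm
          · exact hpre m hm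
          · simp at hm; subst hm; exact ⟨ht, hv⟩
        have hrec := ih (pre ++ [n]) order visited q i (by simpa using hnum) hcur hpre' hclosed hhead hG
        cases hres : p1Inner target curr ns order visited with
        | mk o rest' =>
          rw [hres] at hrec
          obtain ⟨order', visited'⟩ := rest'
          cases o with
          | some n' => exact hrec
          | none =>
            obtain ⟨news, h1, h2, h3, h4, h5, h6⟩ := hrec
            refine ⟨news, h1, h2, h3, h4, ?_, h6⟩
            intro m hm
            rcases List.mem_cons.mp hm with hm | hm
            · subst hm; exact ⟨ht, h3 _ hv⟩
            · exact h5 m hm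
      · -- fresh discovery
        have hc : PySem.Set.contains visited (PySem.Int.bxor curr n) = false := by
          rw [← Bool.not_eq_true]
          simp [hv]
        set nv := PySem.Int.bxor curr n with hnv
        obtain ⟨rest, hrest, hrestv⟩ := hhead
        obtain ⟨hilt, hgetc⟩ := List.getElem?_eq_some_iff.mp hcur
        -- hypotheses for the recursive call
        have hcur' : (order ++ [nv])[i]? = some curr := by
          rw [List.getElem?_append_left hilt]; exact hcur
        have hmono : ∀ x ∈ visited, x ∈ PySem.Set.add visited nv := fun x h => mem_add_mono _ _ _ h
        have hpre' : ∀ m ∈ pre ++ [n],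
            PySem.Int.bxor curr m ≠ target ∧ PySem.Int.bxor curr m ∈ PySem.Set.add visited nv := by
          intro m hm
          rcases List.mem_append.mp hm with hm | hm
          · exact ⟨(hpre m hm).1, hmono _ (hpre m hm).2⟩
          · simp at hm; subst hm; exact ⟨ht, mem_add_self _ _⟩
        have hclosed' : ∀ u ∈ (order ++ [nv]).take i, Closed target numbers (PySem.Set.add visited nv) u := by
          intro u hu
          rw [List.take_append_of_le_length (Nat.le_of_lt hilt)] at hu
          exact closed_mono hmono (hclosed u hu)
        have hhead' : ∃ rest', order ++ [nv] = 0 :: rest' ∧ ∀ x ∈ rest', x ∈ PySem.Set.add visited nv := by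
          refine ⟨rest ++ [nv], by rw [hrest]; rfl, ?_⟩
          intro x hx
          rcases List.mem_append.mp hx with hx | hx
          · exact hmono _ (hrestv x hx)
          · simp at hx; subst hx; exact mem_add_self _ _
        have hG' : GoodRev numbers (order ++ [nv]) curr p.reverse := goodRev_append _ _ _ _ _ hG
        have hrec := ih (pre ++ [n]) (order ++ [nv]) (PySem.Set.add visited nv)
          (q ++ [(nv, p ++ [n])]) i (by simpa using hnum) hcur' hpre' hclosed' hhead' hG'
        have ht' : ¬ (PySem.Int.bxor curr n = target) := by rw [← hnv]; exact ht
        have hv' : PySem.Int.bxor curr n ∉ visited := by rw [← hnv]; exact hv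
        rw [show p1Inner target curr (n :: ns) order visited =
              p1Inner target curr ns (order ++ [nv]) (PySem.Set.add visited nv) from by
            simp [p1Inner, ht', hv', hnv],
          show (searchStepA target curr p (n :: ns) visited q :
                (Int × List Int) ⊕ (PySem.Set Int × List (Int × List Int))) =
              searchStepA target curr p ns (PySem.Set.add visited nv)
                (q ++ [(nv, p ++ [n])]) from by
            simp [searchStepA, ht', hv', hnv]]
        cases hres : p1Inner target curr ns (order ++ [nv]) (PySem.Set.add visited nv) with
        | mk o rest' =>
          rw [hres] at hrec
          obtain ⟨order', visited'⟩ := rest'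
          cases o with
          | some n' =>
            obtain ⟨h1, ext, h2⟩ := hrec
            exact ⟨h1, [nv] ++ ext, by simpa using h2⟩
          | none =>
            obtain ⟨news, h1, h2, h3, h4, h5, h6⟩ := hrec
            have hmono' : ∀ x ∈ visited, x ∈ visited' := fun x h => h3 _ (hmono _ h)
            -- the invariant of the freshly created entry (nv, p ++ [n])
            have hnewInv : EntryInv target numbers order' visited' (nv, p ++ [n]) ∨ nv = curr := by
              by_cases h0 : nv = 0
              · -- value 0: settled, or it is curr itself when i = 0
                cases i with
                | zero =>
                  right
                  rw [hrest] at hcur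
                  simp at hcur
                  omega
                | succ k =>
                  left; right
                  have h0mem : (0 : Int) ∈ order.take (k + 1) := by
                    rw [hrest]; simp
                  exact closed_mono hmono' (h0 ▸ hclosed 0 h0mem)
              · -- fresh non-zero value: its path is reconstructible
                left; left
                have hnvnotin : nv ∉ order := by
                  rw [hrest]
                  intro hmem
                  rcases List.mem_cons.mp hmem with hmem | hmem
                  · exact h0 hmem
                  · exact hv (hrestv _ hmem)
                have hgood : GoodRev numbers (order ++ [nv]) nv (n :: p.reverse) := by
                  refine ⟨by simp, curr, ?_, ?_, hG'⟩
                  · -- parentOf finds (curr, n)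
                    have hdecomp : order ++ [nv] = order.take i ++ curr :: (order.drop (i + 1) ++ [nv]) := by
                      conv_lhs => rw [← List.take_append_drop i order]
                      rw [List.drop_eq_getElem_cons hilt, hgetc]
                      simp
                    rw [hdecomp]
                    refine parentOf_found ?_ ?_
                    · intro u hu
                      refine firstN_none fun m hm heq => ?_
                      exact hv (heq ▸ (hclosed u hu m hm).2)
                    · have hsplit : pre ++ n :: ns = numbers := by simpa using hnum
                      rw [← hsplit]
                      exact firstN_found (fun m hm heq => hv (heq ▸ (hpre m hm).2)) rfl
                  · -- position of curr precedes position of nv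
                    have hle : (order ++ [nv]).idxOf curr ≤ i := idxOf_le_of_getElem? hcur'
                    have hfr : (order ++ [nv]).idxOf nv = order.length := idxOf_append_fresh hnvnotin
                    omega
                have hfin : GoodRev numbers order' nv (n :: p.reverse) := by
                  rw [h2]
                  exact goodRev_append _ _ _ _ _ hgood
                show GoodRev numbers order' nv (p ++ [n]).reverse
                simpa using hfin
            refine ⟨(nv, p ++ [n]) :: news, by simpa using h1, by simpa using h2,
              hmono', ?_, ?_, ?_⟩
            · intro e he
              rcases List.mem_cons.mp he with he | he
              · subst he; exact h3 _ (mem_add_self _ _)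
              · exact h4 e he
            · intro m hm
              rcases List.mem_cons.mp hm with hm | hm
              · subst hm; exact ⟨ht, h3 _ (mem_add_self _ _)⟩
              · exact h5 m hm
            · intro e he
              rcases List.mem_cons.mp he with he | he
              · subst he; exact hnewInv
              · exact h6 e he

-- the main loops in lockstep
theorem main_sim (target : Int) (numbers : List Int) :
    ∀ (fuel i : Nat) (order : List Int) (visited : PySem.Set Int) (qA : List (Int × List Int)),
      order.drop i = qA.map Prod.fst →
      (∃ rest, order = 0 :: rest ∧ ∀ x ∈ rest, x ∈ visited) →
      (∀ u ∈ order.take i, Closed target numbers visited u) →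
      (∀ e ∈ qA, EntryInv target numbers order visited e) →
      searchGoA target numbers fuel qA visited =
        (match p1Go target numbers fuel i order visited with
         | (none, _) => (-1, [])
         | (some (curr, n), order') =>
           match walkB numbers order' (order'.length + 1) curr [n] with
           | none => (-1, [])
           | some moves => ((moves.reverse.length : Int), moves.reverse)) := by
  intro fuel
  induction fuel with
  | zero => intro i order visited qA _ _ _ _; simp [searchGoA, p1Go]
  | succ k ih =>
    intro i order visited qA hdrop hhead hclosed hinv
    match qA with
    | [] =>
      have hnil : order.drop i = [] := by simpa using hdrop
      have hnone : order[i]? = none := by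
        rw [List.getElem?_eq_none_iff]
        have := List.drop_eq_nil_iff.mp hnil
        omega
      simp [searchGoA, p1Go, hnone]
    | (curr, p) :: restQ =>
      have hdc : order.drop i = curr :: restQ.map Prod.fst := by simpa using hdrop
      have hcur : order[i]? = some curr := by
        have h0 : (order.drop i)[0]? = some curr := by rw [hdc]; rfl
        rw [List.getElem?_drop] at h0; simpa using h0
      obtain ⟨hilt, -⟩ := List.getElem?_eq_some_iff.mp hcur
      have hdrop1 : order.drop (i + 1) = restQ.map Prod.fst := by
        rw [← List.tail_drop, hdc]; rfl
      rw [searchGoA, p1Go, hcur]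
      rcases hinv (curr, p) (by simp) with hGc | hCl
      · -- reconstructible entry
        have hmain := inner_good target curr numbers p numbers [] order visited restQ i
          (by simp) hcur (by simp) hclosed hhead hGc
        cases hres : p1Inner target curr numbers order visited with
        | mk o rp =>
          rw [hres] at hmain
          obtain ⟨order', visited'⟩ := rp
          cases o with
          | some n =>
            obtain ⟨h1, ext, h2⟩ := hmain
            simp only [h1, hres]
            obtain ⟨rest0, hrest0, -⟩ := hhead
            have hord0 : order' = 0 :: (rest0 ++ ext) := by rw [h2, hrest0]; rfl
            have hGc' : GoodRev numbers order' curr p.reverse := by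
              rw [h2]; exact goodRev_append _ _ _ _ _ hGc
            have h0idx : order'.idxOf (0 : Int) = 0 := by rw [hord0]; simp
            have hmem : curr ∈ order' := by
              rw [h2]
              exact List.mem_append_left _ (List.mem_of_getElem? hcur)
            have hwb := walkB_of_goodRev numbers order' h0idx p.reverse curr hGc' [n]
              (order'.length + 1) (by have := List.idxOf_lt_length_of_mem hmem; omega)
            rw [hwb]
            simp
          | none =>
            obtain ⟨news, h1, h2, h3, h4, h5, h6⟩ := hmain
            simp only [h1, hres]
            apply ih (i + 1) order' visited' (restQ ++ news)
            · rw [h2, List.drop_append_of_le_length (by omega), hdrop1]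
              simp
            · obtain ⟨rest0, hrest0, hrv0⟩ := hhead
              refine ⟨rest0 ++ news.map Prod.fst, by rw [h2, hrest0]; rfl, ?_⟩
              intro x hx
              rcases List.mem_append.mp hx with hx | hx
              · exact h3 _ (hrv0 x hx)
              · obtain ⟨e, he, hex⟩ := List.mem_map.mp hx
                exact hex ▸ h4 e he
            · intro u hu
              rw [h2, List.take_append_of_le_length (by omega), List.take_add_one] at hu
              rcases List.mem_append.mp hu with hu | hu
              · exact closed_mono h3 (hclosed u hu)
              · rw [hcur] at hu; simp at hu; subst hu
                exact h5
            · intro e he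
              rcases List.mem_append.mp he with he | he
              · have := hinv e (List.mem_cons_of_mem _ he)
                rw [h2]; exact entryInv_mono h3 this
              · rcases h6 e he with hE | hE
                · exact hE
                · exact .inr (hE ▸ h5)
      · -- already-settled entry: the inner loop is a no-op
        obtain ⟨hi1, hi2⟩ := inner_closed target curr p numbers order visited restQ
          (fun m hm => ⟨(hCl m hm).1, (hCl m hm).2⟩)
        simp only [hi1, hi2]
        apply ih (i + 1) order visited restQ hdrop1 hhead
        · intro u hu
          rw [List.take_add_one] at hu
          rcases List.mem_append.mp hu with hu | hu
          · exact hclosed u hu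
          · rw [hcur] at hu; simp at hu; subst hu
            exact hCl
        · exact fun e he => hinv e (List.mem_cons_of_mem _ he)

-- ===== VERDICT (by name: the statement is the Claim_ definition above) =====
theorem search_spec : Claim_equal_search := by
  intro target numbers _
  unfold Spec_search search search_alt
  by_cases h : target = 0
  · simp [h]
  · simp only [h, if_false]
    exact main_sim target numbers (2 ^ numbers.length + 1) 0 [0] PySem.Set.empty [(0, [])]
      (by simp) ⟨[], rfl, by simp⟩ (by simp)
      (by intro e he; simp at he; subst he; exact .inl rfl)
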